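-- pv_equiv track=rewrite | github.com/kratos0002/luminaria-book-recommender | LiteratureDiscovery/update_recommendations.py | extract_author_from_input
-- ===== SOURCE A (Python) =====
-- def extract_author_from_input(literature_input):
--     """
--     Extract potential author name from user input.
--
--     Args:
--         literature_input: User input string
--
--     Returns:
--         Optional author name or None
--     """
--     author_name = None
--     if literature_input:
--         # Check for common authors in the input
--         if "dostoevsky" in literature_input.lower() or any(name in literature_input.lower() for name in ["karamazov", "crime and punishment", "idiot"]):
--             author_name = "dostoevsky"
--         elif "tolkien" in literature_input.lower() or any(name in literature_input.lower() for name in ["lord of the rings", "hobbit", "middle earth"]):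
--             author_name = "tolkien"
--         elif "austen" in literature_input.lower() or any(name in literature_input.lower() for name in ["pride and prejudice", "emma", "sense and sensibility"]):
--             author_name = "austen"
--
--     return author_name
-- ===== SOURCE B (Python) =====
-- KEYWORD_AUTHOR = [
--     ("dostoevsky", "dostoevsky"), ("karamazov", "dostoevsky"),
--     ("crime and punishment", "dostoevsky"), ("idiot", "dostoevsky"),
--     ("tolkien", "tolkien"), ("lord of the rings", "tolkien"),
--     ("hobbit", "tolkien"), ("middle earth", "tolkien"),
--     ("austen", "austen"), ("pride and prejudice", "austen"),
--     ("emma", "austen"), ("sense and sensibility", "austen"),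
-- ]
--
-- PRIORITY = ("dostoevsky", "tolkien", "austen")
--
--
-- def extract_author_from_input(literature_input):
--     """Extract potential author name from user input.
--
--     One left-to-right scan over the positions of the lowered text collects the
--     set of every author whose keyword starts at some position; a second pass
--     picks the highest-priority author from that set.
--     """
--     if literature_input is None:
--         return None
--     text = literature_input.lower()
--     found = set()
--     for i in range(len(text)):
--         for kw, author in KEYWORD_AUTHOR:
--             if text.startswith(kw, i):
--                 found.add(author)
--     for author in PRIORITY:
--         if author in found:
--             return author
--     return None
-- ===== Notes on version B (the rewrite author's own statement) =====
-- stated objective: alternative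
-- what changed: Replaces the author-major if/elif cascade of substring tests (which re-lowercases the input repeatedly) with a position-major scan of the once-lowered text that collects the set of all matched authors via startswith at each index, followed by a separate priority-order pick from that set.
import Mathlib
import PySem

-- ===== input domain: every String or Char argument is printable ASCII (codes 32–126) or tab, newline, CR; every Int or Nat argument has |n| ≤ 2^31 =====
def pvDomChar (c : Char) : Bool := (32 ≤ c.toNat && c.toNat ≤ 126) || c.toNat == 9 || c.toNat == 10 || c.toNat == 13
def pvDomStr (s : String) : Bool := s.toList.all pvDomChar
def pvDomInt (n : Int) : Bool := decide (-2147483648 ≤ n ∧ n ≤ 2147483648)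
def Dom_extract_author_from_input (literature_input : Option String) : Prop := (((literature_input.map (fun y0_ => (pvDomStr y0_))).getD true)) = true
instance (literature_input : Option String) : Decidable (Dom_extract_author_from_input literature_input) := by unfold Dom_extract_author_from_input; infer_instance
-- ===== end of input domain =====

-- B replaces A's author-major if/elif cascade with a position-major scan collecting the set of matched authors, then a priority-order pick (alternative algorithm, same cost).


-- ===== PORT A =====
def extract_author_from_input (literature_input : Option String) : Option String :=
  match literature_input with
  | none => none
  | some s =>
    if s = "" then none   -- 'if literature_input:' is false for None and for ""
    else if PySem.Str.isIn "dostoevsky" (PySem.Str.lower s)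
         || ["karamazov", "crime and punishment", "idiot"].any
              (fun name => PySem.Str.isIn name (PySem.Str.lower s)) then some "dostoevsky"
    else if PySem.Str.isIn "tolkien" (PySem.Str.lower s)
         || ["lord of the rings", "hobbit", "middle earth"].any
              (fun name => PySem.Str.isIn name (PySem.Str.lower s)) then some "tolkien"
    else if PySem.Str.isIn "austen" (PySem.Str.lower s)
         || ["pride and prejudice", "emma", "sense and sensibility"].any
              (fun name => PySem.Str.isIn name (PySem.Str.lower s)) then some "austen"
    else none

-- ===== PORT B =====
def kwAuthor : List (String × String) :=
  [("dostoevsky", "dostoevsky"), ("karamazov", "dostoevsky"),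
   ("crime and punishment", "dostoevsky"), ("idiot", "dostoevsky"),
   ("tolkien", "tolkien"), ("lord of the rings", "tolkien"),
   ("hobbit", "tolkien"), ("middle earth", "tolkien"),
   ("austen", "austen"), ("pride and prejudice", "austen"),
   ("emma", "austen"), ("sense and sensibility", "austen")]

def extract_author_from_input_alt (literature_input : Option String) : Option String :=
  match literature_input with
  | none => none
  | some s =>
    let text := PySem.Str.lower s
    -- text.startswith(kw, i) with 0 ≤ i ≤ len(text) is exactly kw being a prefix of text[i:]:
    -- ported as PySem.Chars.startswith on the dropped character list (exact on this domain).
    let found : PySem.Set String :=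
      (List.range text.toList.length).foldl
        (fun f i => kwAuthor.foldl
          (fun f p =>
            if PySem.Chars.startswith (text.toList.drop i) p.1.toList
            then PySem.Set.add f p.2 else f) f)
        PySem.Set.empty
    if PySem.Set.contains found "dostoevsky" then some "dostoevsky"
    else if PySem.Set.contains found "tolkien" then some "tolkien"
    else if PySem.Set.contains found "austen" then some "austen"
    else none

-- ===== PRECONDITION & SPEC =====
def Spec_extract_author_from_input (literature_input : Option String) (out : Option String) : Prop := out = extract_author_from_input_alt literature_input
instance (literature_input : Option String) (out : Option String) : Decidable (Spec_extract_author_from_input literature_input out) := by unfold Spec_extract_author_from_input; infer_instance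

-- ===== CLAIM (what is proved, stated in full; the proofs are below) =====
def Claim_equal_extract_author_from_input : Prop := ∀ (literature_input : Option String), Dom_extract_author_from_input literature_input → Spec_extract_author_from_input literature_input (extract_author_from_input literature_input)

-- ===== LEMMAS AND PROOFS =====

-- membership after the inner fold over the keyword table
theorem mem_inner (c : String × String → Bool) (tbl : List (String × String))
    (f : PySem.Set String) (a : String) :
    a ∈ tbl.foldl (fun f p => if c p then PySem.Set.add f p.2 else f) f ↔
      a ∈ f ∨ ∃ p ∈ tbl, c p = true ∧ p.2 = a := by
  induction tbl generalizing f with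
  | nil => simp
  | cons q tl ih =>
    rw [List.foldl_cons, ih]
    by_cases hq : c q = true
    · rw [if_pos hq]
      simp only [PySem.Set.mem_add, List.mem_cons]
      constructor
      · rintro ((h | h) | ⟨p, hp, hc, hpa⟩)
        · exact Or.inl h
        · exact Or.inr ⟨q, Or.inl rfl, hq, h.symm⟩
        · exact Or.inr ⟨p, Or.inr hp, hc, hpa⟩
      · rintro (h | ⟨p, (rfl | hp), hc, hpa⟩)
        · exact Or.inl (Or.inl h)
        · exact Or.inl (Or.inr hpa.symm)
        · exact Or.inr ⟨p, hp, hc, hpa⟩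
    · rw [if_neg hq]
      simp only [List.mem_cons]
      constructor
      · rintro (h | ⟨p, hp, hc, hpa⟩)
        · exact Or.inl h
        · exact Or.inr ⟨p, Or.inr hp, hc, hpa⟩
      · rintro (h | ⟨p, (rfl | hp), hc, hpa⟩)
        · exact Or.inl h
        · exact absurd hc hq
        · exact Or.inr ⟨p, hp, hc, hpa⟩

-- membership after the whole position scan
theorem mem_scan (t : List Char) (l : List Nat) (f : PySem.Set String) (a : String) :
    a ∈ l.foldl
        (fun f i => kwAuthor.foldl
          (fun f p =>
            if PySem.Chars.startswith (t.drop i) p.1.toList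
            then PySem.Set.add f p.2 else f) f) f ↔
      a ∈ f ∨ ∃ i ∈ l, ∃ p ∈ kwAuthor,
        PySem.Chars.startswith (t.drop i) p.1.toList = true ∧ p.2 = a := by
  induction l generalizing f with
  | nil => simp
  | cons j tl ih =>
    rw [List.foldl_cons, ih,
      mem_inner (fun p => PySem.Chars.startswith (t.drop j) p.1.toList)]
    simp only [List.mem_cons]
    constructor
    · rintro ((h | h) | ⟨i, hi, h⟩)
      · exact Or.inl h
      · exact Or.inr ⟨j, Or.inl rfl, h⟩
      · exact Or.inr ⟨i, Or.inr hi, h⟩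
    · rintro (h | ⟨i, (rfl | hi), h⟩)
      · exact Or.inl (Or.inl h)
      · exact Or.inl (Or.inr h)
      · exact Or.inr ⟨i, hi, h⟩

-- a nonempty keyword starts at some scanned position iff it is a substring
theorem pos_iff_isIn (kw t : List Char) (hkw : kw ≠ []) :
    (∃ i ∈ List.range t.length, PySem.Chars.startswith (t.drop i) kw = true) ↔
      PySem.Chars.isIn kw t = true := by
  rw [← PySem.Chars.exists_prefix_drop_iff_isIn]
  simp only [PySem.Chars.startswith_iff]
  constructor
  · rintro ⟨i, _, h⟩; exact ⟨i, h⟩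
  · rintro ⟨j, h⟩
    refine ⟨j, List.mem_range.mpr ?_, h⟩
    by_contra hj
    have : t.drop j = [] := List.drop_eq_nil_of_le (by omega)
    rw [this] at h
    exact hkw (List.prefix_nil.mp h)

-- characterization of B's found-set
theorem found_spec (t : List Char) (a : String) :
    a ∈ (List.range t.length).foldl
        (fun f i => kwAuthor.foldl
          (fun f p =>
            if PySem.Chars.startswith (t.drop i) p.1.toList
            then PySem.Set.add f p.2 else f) f)
        PySem.Set.empty ↔
      ∃ p ∈ kwAuthor, PySem.Chars.isIn p.1.toList t = true ∧ p.2 = a := by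
  rw [mem_scan]
  simp only [PySem.Set.empty, List.not_mem_nil, false_or]
  constructor
  · rintro ⟨i, hi, p, hp, hsw, hpa⟩
    exact ⟨p, hp, (pos_iff_isIn p.1.toList t (by fin_cases hp <;> decide)).mp ⟨i, hi, hsw⟩, hpa⟩
  · rintro ⟨p, hp, hin, hpa⟩
    obtain ⟨i, hi, hsw⟩ := (pos_iff_isIn p.1.toList t (by fin_cases hp <;> decide)).mpr hin
    exact ⟨i, hi, p, hp, hsw, hpa⟩

-- ===== VERDICT (by name: the statement is the Claim_ definition above) =====
theorem extract_author_from_input_spec : Claim_equal_extract_author_from_input := by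
  intro li _
  unfold Spec_extract_author_from_input
  cases li with
  | none => rfl
  | some s =>
    by_cases hs : s = ""
    · subst hs; decide
    · simp only [extract_author_from_input, extract_author_from_input_alt, if_neg hs,
        PySem.Set.contains, List.contains_iff_mem, found_spec]
      simp only [kwAuthor, List.mem_cons, List.not_mem_nil, PySem.Str.isIn_eq,
        List.any_cons, List.any_nil, Bool.or_false, Bool.or_eq_true]
      split_ifs <;> simp_all
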